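-- pv_equiv track=rewrite | github.com/vineel-panyala/Wordle | easy_wordle.py | easy_check_word
-- ===== SOURCE A (Python) =====
-- def easy_check_word(secret,guess):
--     "Takes in a guess and returns the output clue"
--     colors = ["","","","",""]
--
--     """Assigning green hints"""
--     for char in range(len(secret)):
--         if guess[char] == secret[char]:
--             colors[char] = "green"
--
--     """Assigning yellow hints"""
--     for char in range(len(secret)):
--         if colors[char] != "green":
--             for check_indices in range(len(secret)):
--                 if guess[check_indices] == secret[char] and colors[check_indices]!= "green":
--                     colors[check_indices] = "yellow"
--
--     """Assigning grey hints"""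
--     for char in range(len(secret)):
--         if colors[char] == "":
--             colors[char] = "grey"
--     return colors
-- ===== SOURCE B (Python) =====
-- def easy_check_word(secret, guess):
--     "Takes in a guess and returns the output clue"
--     n = len(secret)
--     colors = ["", "", "", "", ""]
--     unmatched = set()
--     for i in range(n):
--         if guess[i] == secret[i]:
--             colors[i] = "green"
--         else:
--             unmatched.add(secret[i])
--     for i in range(n):
--         if colors[i] != "green":
--             colors[i] = "yellow" if guess[i] in unmatched else "grey"
--     return colors
-- ===== Notes on version B (the rewrite author's own statement) =====
-- stated objective: simpler
-- what changed: Builds a set of secret letters at non-green positions in the green pass, then colors each remaining slot yellow/grey by one membership test, eliminating A's nested quadratic yellow scan.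
import Mathlib
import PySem

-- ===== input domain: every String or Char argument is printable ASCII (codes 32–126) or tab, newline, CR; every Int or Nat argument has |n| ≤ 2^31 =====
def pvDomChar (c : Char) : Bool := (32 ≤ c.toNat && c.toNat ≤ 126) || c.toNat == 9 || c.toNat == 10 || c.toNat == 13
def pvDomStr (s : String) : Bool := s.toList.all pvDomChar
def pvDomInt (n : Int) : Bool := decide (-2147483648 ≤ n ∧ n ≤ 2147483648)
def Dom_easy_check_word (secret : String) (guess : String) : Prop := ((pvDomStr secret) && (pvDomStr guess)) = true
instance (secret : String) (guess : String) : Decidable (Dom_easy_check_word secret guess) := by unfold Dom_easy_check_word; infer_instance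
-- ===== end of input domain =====

-- B replaces A's nested quadratic yellow scan by a set of unmatched secret letters built during the
-- green pass and a single membership test per slot (objective: simpler, one pass less).

-- ===== PORT A =====
-- Literal port of A; list indexing is via getD, exact under Pre_ (all indices in range there).
def easy_check_word (secret : String) (guess : String) : List String :=
  let s := secret.toList
  let g := guess.toList
  let n := s.length
  let colors : List String := ["", "", "", "", ""]
  let colors := (List.range n).foldl (fun c i =>
    if g.getD i ' ' = s.getD i ' ' then c.set i "green" else c) colors
  let colors := (List.range n).foldl (fun c i =>
    if c.getD i "" ≠ "green" then
      (List.range n).foldl (fun c2 j =>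
        if g.getD j ' ' = s.getD i ' ' ∧ c2.getD j "" ≠ "green" then c2.set j "yellow" else c2) c
    else c) colors
  (List.range n).foldl (fun c i => if c.getD i "" = "" then c.set i "grey" else c) colors

-- ===== PORT B =====
def easy_check_word_alt (secret : String) (guess : String) : List String :=
  let s := secret.toList
  let g := guess.toList
  let n := s.length
  let st := (List.range n).foldl (fun (p : List String × PySem.Set Char) i =>
    if g.getD i ' ' = s.getD i ' ' then (p.1.set i "green", p.2)
    else (p.1, PySem.Set.add p.2 (s.getD i ' '))) (["", "", "", "", ""], PySem.Set.empty)
  (List.range n).foldl (fun c i =>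
    if c.getD i "" ≠ "green" then
      c.set i (if PySem.Set.contains st.2 (g.getD i ' ') then "yellow" else "grey")
    else c) st.1

-- ===== PRECONDITION & SPEC =====
-- Pre_ excludes exactly the inputs where Python A raises IndexError: a secret longer than the
-- 5-slot colors list, or a guess shorter than the secret.
def Pre_easy_check_word (secret : String) (guess : String) : Prop :=
  secret.toList.length ≤ 5 ∧ secret.toList.length ≤ guess.toList.length
instance (secret : String) (guess : String) : Decidable (Pre_easy_check_word secret guess) := by
  unfold Pre_easy_check_word; infer_instance
def pvWitness_easy_check_word : String × String := ("abc", "cab")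

def Spec_easy_check_word (secret : String) (guess : String) (out : List String) : Prop := out = easy_check_word_alt secret guess
instance (secret : String) (guess : String) (out : List String) : Decidable (Spec_easy_check_word secret guess out) := by unfold Spec_easy_check_word; infer_instance

-- ===== CLAIM (what is proved, stated in full; the proofs are below) =====
def Claim_equal_easy_check_word : Prop := ∀ (secret : String) (guess : String), Dom_easy_check_word secret guess → Pre_easy_check_word secret guess → Spec_easy_check_word secret guess (easy_check_word secret guess)

-- ===== LEMMAS AND PROOFS =====

-- membership predicate: c is a secret letter at some non-green position < m
def pvMem (s g : List Char) (m : Nat) (c : Char) : Bool :=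
  (List.range m).any (fun i => !(g.getD i ' ' == s.getD i ' ') && (c == s.getD i ' '))

def pvYel (s g : List Char) (m p : Nat) : Bool := pvMem s g m (g.getD p ' ')

def pvF1 (s g : List Char) (m p : Nat) : String :=
  if p < m ∧ g.getD p ' ' = s.getD p ' ' then "green" else ""

def pvF2 (s g : List Char) (n m p : Nat) : String :=
  if p < n ∧ g.getD p ' ' = s.getD p ' ' then "green"
  else if p < n ∧ pvYel s g m p = true then "yellow" else ""

def pvF3 (s g : List Char) (n m p : Nat) : String :=
  if p < n ∧ g.getD p ' ' = s.getD p ' ' then "green"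
  else if p < n ∧ pvYel s g n p = true then "yellow"
  else if p < m then "grey" else ""

theorem pvMap5_getD (f : Nat → String) (i : Nat) (d : String) :
    ((List.range 5).map f).getD i d = if i < 5 then f i else d := by
  by_cases h : i < 5 <;> simp [List.getD, List.getElem?_range, h]

theorem pvMap5_set (f : Nat → String) (m : Nat) (hm : m < 5) (v : String) :
    ((List.range 5).map f).set m v = (List.range 5).map (fun p => if p = m then v else f p) := by
  apply List.ext_getElem
  · simp
  · intro i h1 h2
    simp only [List.getElem_set, List.getElem_map, List.getElem_range]
    simp at h1
    by_cases h : m = i <;> simp [h]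
    omega

theorem pvMapRange5_congr {f h : Nat → String} (H : ∀ p, p < 5 → f p = h p) :
    (List.range 5).map f = (List.range 5).map h :=
  List.map_congr_left (by simpa using H)

theorem pvGreenA (s g : List Char) : ∀ m, m ≤ 5 →
    (List.range m).foldl (fun c i => if g.getD i ' ' = s.getD i ' ' then c.set i "green" else c)
        ["", "", "", "", ""]
      = (List.range 5).map (pvF1 s g m) := by
  intro m hm
  induction m with
  | zero => simp [pvF1, List.range_succ]
  | succ k ih =>
    rw [List.range_succ, List.foldl_append, ih (by omega)]
    simp only [List.foldl_cons, List.foldl_nil]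
    by_cases hg : g.getD k ' ' = s.getD k ' '
    · rw [if_pos hg, pvMap5_set _ k (by omega)]
      apply pvMapRange5_congr
      intro p hp
      by_cases hpk : p = k
      · subst hpk
        rw [if_pos rfl, pvF1, if_pos ⟨Nat.lt_succ_self p, hg⟩]
      · rw [if_neg hpk, pvF1, pvF1]
        simp only [show (p < k) ↔ (p < k + 1) from by omega]
    · rw [if_neg hg]
      apply pvMapRange5_congr
      intro p hp
      by_cases hpk : p = k
      · subst hpk
        rw [pvF1, pvF1, if_neg (by rintro ⟨h, -⟩; omega), if_neg (by rintro ⟨-, h⟩; exact hg h)]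
      · rw [pvF1, pvF1]; simp only [show (p < k) ↔ (p < k + 1) from by omega]

theorem pvInner (s g : List Char) (n m i : Nat) (hn : n ≤ 5) (hi : i < n)
    (hgi : ¬ g.getD i ' ' = s.getD i ' ') : ∀ k, k ≤ n →
    (List.range k).foldl (fun c2 j =>
        if g.getD j ' ' = s.getD i ' ' ∧ c2.getD j "" ≠ "green" then c2.set j "yellow" else c2)
        ((List.range 5).map (pvF2 s g n m))
      = (List.range 5).map (fun p =>
          if p < n ∧ g.getD p ' ' = s.getD p ' ' then "green"
          else if p < n ∧ (pvYel s g m p = true ∨ (p < k ∧ g.getD p ' ' = s.getD i ' ')) then "yellow"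
          else "") := by
  intro k hk
  induction k with
  | zero =>
    simp only [List.range_zero, List.foldl_nil]
    apply pvMapRange5_congr
    intro p hp
    simp [pvF2]
  | succ k ih =>
    rw [show List.range (k+1) = List.range k ++ [k] from List.range_succ, List.foldl_append,
      ih (by omega)]
    simp only [List.foldl_cons, List.foldl_nil]
    rw [pvMap5_getD]
    have hk5 : k < 5 := by omega
    have hkn : k < n := by omega
    rw [if_pos hk5]
    by_cases hgk : g.getD k ' ' = s.getD i ' '
    · by_cases hgr : g.getD k ' ' = s.getD k ' '
      · -- slot k is green: no write
        rw [if_neg (by rintro ⟨-, hne⟩; exact hne (by rw [if_pos ⟨hkn, hgr⟩]))]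
        apply pvMapRange5_congr
        intro p hp
        by_cases hpk : p = k
        · subst hpk
          have hc : p < n ∧ g.getD p ' ' = s.getD p ' ' := ⟨hkn, hgr⟩
          simp only [if_pos hc]
        · simp only [show (p < k) ↔ (p < k + 1) from by omega]
      · -- slot k written yellow
        have hval : (if k < n ∧ g.getD k ' ' = s.getD k ' ' then "green"
            else if k < n ∧ (pvYel s g m k = true ∨ (k < k ∧ g.getD k ' ' = s.getD i ' ')) then "yellow"
            else "") ≠ "green" := by
          rw [if_neg (fun h => hgr h.2)]
          split <;> decide
        rw [if_pos ⟨hgk, hval⟩, pvMap5_set _ k hk5]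
        apply pvMapRange5_congr
        intro p hp
        by_cases hpk : p = k
        · subst hpk
          rw [if_pos rfl, if_neg (fun h => hgr h.2),
            if_pos ⟨hkn, Or.inr ⟨Nat.lt_succ_self p, hgk⟩⟩]
        · rw [if_neg hpk]; simp only [show (p < k) ↔ (p < k + 1) from by omega]
    · -- g[k] ≠ s[i]: no write
      rw [if_neg (by rintro ⟨h1, -⟩; exact hgk h1)]
      apply pvMapRange5_congr
      intro p hp
      by_cases hpk : p = k
      · subst hpk
        have h1 : (p < n ∧ (pvYel s g m p = true ∨ (p < p ∧ g.getD p ' ' = s.getD i ' '))) ↔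
            (p < n ∧ (pvYel s g m p = true ∨ (p < p + 1 ∧ g.getD p ' ' = s.getD i ' '))) := by
          constructor <;> rintro ⟨h, hy | ⟨-, he⟩⟩
          · exact ⟨h, Or.inl hy⟩
          · exact absurd he hgk
          · exact ⟨h, Or.inl hy⟩
          · exact absurd he hgk
        by_cases hgr : g.getD p ' ' = s.getD p ' '
        · have hc : p < n ∧ g.getD p ' ' = s.getD p ' ' := ⟨hkn, hgr⟩
          simp only [if_pos hc]
        · have hc : ¬(p < n ∧ g.getD p ' ' = s.getD p ' ') := fun h => hgr h.2
          simp only [if_neg hc]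
          rw [if_congr h1 rfl rfl]
      · simp only [show (p < k) ↔ (p < k + 1) from by omega]

theorem pvYellowA (s g : List Char) (n : Nat) (hn : n ≤ 5) : ∀ m, m ≤ n →
    (List.range m).foldl (fun c i =>
        if c.getD i "" ≠ "green" then
          (List.range n).foldl (fun c2 j =>
            if g.getD j ' ' = s.getD i ' ' ∧ c2.getD j "" ≠ "green" then c2.set j "yellow" else c2) c
        else c)
        ((List.range 5).map (pvF1 s g n))
      = (List.range 5).map (pvF2 s g n m) := by
  intro m hm
  induction m with
  | zero =>
    simp only [List.range_zero, List.foldl_nil]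
    apply pvMapRange5_congr
    intro p hp
    rw [pvF1, pvF2]
    by_cases hc : p < n ∧ g.getD p ' ' = s.getD p ' '
    · rw [if_pos hc, if_pos hc]
    · rw [if_neg hc, if_neg hc, if_neg (by rintro ⟨-, h⟩; simp [pvYel, pvMem] at h)]
  | succ m ihm =>
    rw [show List.range (m+1) = List.range m ++ [m] from List.range_succ, List.foldl_append,
      ihm (by omega)]
    simp only [List.foldl_cons, List.foldl_nil]
    rw [pvMap5_getD]
    have hm5 : m < 5 := by omega
    have hmn : m < n := by omega
    rw [if_pos hm5]
    by_cases hgr : g.getD m ' ' = s.getD m ' '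
    · -- slot m is green: outer guard fails, nothing happens
      rw [if_neg (by rw [pvF2, if_pos ⟨hmn, hgr⟩]; exact fun h => h rfl)]
      have hb : (g.getD m ' ' == s.getD m ' ') = true := beq_iff_eq.mpr hgr
      have hy : ∀ p, pvYel s g (m+1) p = pvYel s g m p := by
        intro p
        simp only [pvYel, pvMem, List.range_succ, List.any_append, List.any_cons, List.any_nil,
          hb, Bool.not_true, Bool.false_and, Bool.or_false]
      apply pvMapRange5_congr
      intro p hp
      rw [pvF2, pvF2, hy p]
    · -- slot m not green: inner scan runs
      have hval : pvF2 s g n m m ≠ "green" := by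
        rw [pvF2, if_neg (fun h => hgr h.2)]
        split <;> decide
      rw [if_pos hval, pvInner s g n m m hn hmn hgr n le_rfl]
      have hb : (g.getD m ' ' == s.getD m ' ') = false := beq_eq_false_iff_ne.mpr hgr
      have hyy : ∀ p, pvYel s g (m+1) p = (pvYel s g m p || (g.getD p ' ' == s.getD m ' ')) := by
        intro p
        simp only [pvYel, pvMem, List.range_succ, List.any_append, List.any_cons, List.any_nil,
          hb, Bool.not_false, Bool.true_and, Bool.or_false]
      apply pvMapRange5_congr
      intro p hp
      rw [pvF2]
      by_cases hc : p < n ∧ g.getD p ' ' = s.getD p ' '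
      · rw [if_pos hc, if_pos hc]
      · rw [if_neg hc, if_neg hc]
        have h1 : (p < n ∧ (pvYel s g m p = true ∨ (p < n ∧ g.getD p ' ' = s.getD m ' '))) ↔
            (p < n ∧ pvYel s g (m+1) p = true) := by
          rw [hyy p]
          constructor
          · rintro ⟨h, hy | ⟨-, he⟩⟩
            · exact ⟨h, by rw [hy, Bool.true_or]⟩
            · exact ⟨h, by rw [beq_iff_eq.mpr he, Bool.or_true]⟩
          · rintro ⟨h, hor⟩
            refine ⟨h, ?_⟩
            rcases (by simpa using hor : pvYel s g m p = true ∨ (g.getD p ' ' == s.getD m ' ') = true) with hy | he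
            · exact Or.inl hy
            · exact Or.inr ⟨h, by simpa using he⟩
        rw [if_congr h1 rfl rfl]

theorem pvGrey (s g : List Char) (n : Nat) (hn : n ≤ 5) : ∀ m, m ≤ n →
    (List.range m).foldl (fun c i => if c.getD i "" = "" then c.set i "grey" else c)
        ((List.range 5).map (pvF2 s g n n))
      = (List.range 5).map (pvF3 s g n m) := by
  intro m hm
  induction m with
  | zero =>
    simp only [List.range_zero, List.foldl_nil]
    apply pvMapRange5_congr
    intro p hp
    rw [pvF2, pvF3, if_neg (show ¬ p < 0 from by omega)]
  | succ m ihm =>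
    rw [show List.range (m+1) = List.range m ++ [m] from List.range_succ, List.foldl_append,
      ihm (by omega)]
    simp only [List.foldl_cons, List.foldl_nil]
    rw [pvMap5_getD]
    have hm5 : m < 5 := by omega
    have hmn : m < n := by omega
    rw [if_pos hm5]
    by_cases hgr : g.getD m ' ' = s.getD m ' '
    · rw [if_neg (by rw [pvF3, if_pos ⟨hmn, hgr⟩]; decide)]
      apply pvMapRange5_congr
      intro p hp
      rw [pvF3, pvF3]
      by_cases hpk : p = m
      · subst hpk
        have hc : p < n ∧ g.getD p ' ' = s.getD p ' ' := ⟨hmn, hgr⟩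
        simp only [if_pos hc]
      · simp only [show (p < m) ↔ (p < m + 1) from by omega]
    · by_cases hy : pvYel s g n m = true
      · rw [if_neg (by rw [pvF3, if_neg (fun h => hgr h.2), if_pos ⟨hmn, hy⟩]; decide)]
        apply pvMapRange5_congr
        intro p hp
        rw [pvF3, pvF3]
        by_cases hpk : p = m
        · subst hpk
          have hc : p < n ∧ pvYel s g n p = true := ⟨hmn, hy⟩
          simp only [if_pos hc]
        · simp only [show (p < m) ↔ (p < m + 1) from by omega]
      · rw [if_pos (by rw [pvF3, if_neg (fun h => hgr h.2), if_neg (fun h => hy h.2),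
          if_neg (show ¬ m < m from by omega)]), pvMap5_set _ m hm5]
        apply pvMapRange5_congr
        intro p hp
        by_cases hpk : p = m
        · subst hpk
          rw [if_pos rfl, pvF3, if_neg (fun h => hgr h.2), if_neg (fun h => hy h.2),
            if_pos (Nat.lt_succ_self p)]
        · rw [if_neg hpk, pvF3, pvF3]
          simp only [show (p < m) ↔ (p < m + 1) from by omega]

theorem pvContains_add (t : PySem.Set Char) (x c : Char) :
    PySem.Set.contains (PySem.Set.add t x) c = (PySem.Set.contains t c || (c == x)) := by
  rw [Bool.eq_iff_iff]
  simp [PySem.Set.contains_iff, PySem.Set.mem_add]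

theorem pvGreenB (s g : List Char) : ∀ m, m ≤ 5 →
    (List.range m).foldl (fun (p : List String × PySem.Set Char) i =>
        if g.getD i ' ' = s.getD i ' ' then (p.1.set i "green", p.2)
        else (p.1, PySem.Set.add p.2 (s.getD i ' '))) (["", "", "", "", ""], PySem.Set.empty)
      = (((List.range 5).map (pvF1 s g m)),
         ((List.range m).foldl (fun (t : PySem.Set Char) i =>
            if g.getD i ' ' = s.getD i ' ' then t else PySem.Set.add t (s.getD i ' '))
            PySem.Set.empty)) := by
  intro m hm
  induction m with
  | zero => simp [pvF1, List.range_succ]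
  | succ k ih =>
    rw [show List.range (k+1) = List.range k ++ [k] from List.range_succ]
    simp only [List.foldl_append, List.foldl_cons, List.foldl_nil]
    rw [ih (by omega)]
    by_cases hg : g.getD k ' ' = s.getD k ' '
    · rw [if_pos hg, if_pos hg, Prod.mk.injEq]
      refine ⟨?_, rfl⟩
      rw [pvMap5_set _ k (by omega)]
      apply pvMapRange5_congr
      intro p hp
      by_cases hpk : p = k
      · subst hpk
        rw [if_pos rfl, pvF1, if_pos ⟨Nat.lt_succ_self p, hg⟩]
      · rw [if_neg hpk, pvF1, pvF1]
        simp only [show (p < k) ↔ (p < k + 1) from by omega]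
    · rw [if_neg hg, if_neg hg, Prod.mk.injEq]
      refine ⟨?_, rfl⟩
      apply pvMapRange5_congr
      intro p hp
      by_cases hpk : p = k
      · subst hpk
        rw [pvF1, pvF1, if_neg (by rintro ⟨h, -⟩; omega), if_neg (by rintro ⟨-, h⟩; exact hg h)]
      · rw [pvF1, pvF1]
        simp only [show (p < k) ↔ (p < k + 1) from by omega]

theorem pvSetB (s g : List Char) : ∀ m (c : Char),
    PySem.Set.contains
        ((List.range m).foldl (fun (t : PySem.Set Char) i =>
          if g.getD i ' ' = s.getD i ' ' then t else PySem.Set.add t (s.getD i ' '))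
          PySem.Set.empty) c
      = pvMem s g m c := by
  intro m c
  induction m with
  | zero => simp [pvMem, PySem.Set.empty, PySem.Set.contains]
  | succ k ih =>
    rw [show List.range (k+1) = List.range k ++ [k] from List.range_succ]
    simp only [List.foldl_append, List.foldl_cons, List.foldl_nil]
    by_cases hg : g.getD k ' ' = s.getD k ' '
    · have hb : (g.getD k ' ' == s.getD k ' ') = true := beq_iff_eq.mpr hg
      rw [if_pos hg, ih]
      simp only [pvMem, List.range_succ, List.any_append, List.any_cons, List.any_nil, hb,
        Bool.not_true, Bool.false_and, Bool.or_false]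
    · have hb : (g.getD k ' ' == s.getD k ' ') = false := beq_eq_false_iff_ne.mpr hg
      rw [if_neg hg, pvContains_add, ih]
      simp only [pvMem, List.range_succ, List.any_append, List.any_cons, List.any_nil, hb,
        Bool.not_false, Bool.true_and, Bool.or_false]

theorem pvPass2B (s g : List Char) (n : Nat) (hn : n ≤ 5) (t : PySem.Set Char)
    (ht : ∀ c, PySem.Set.contains t c = pvMem s g n c) : ∀ m, m ≤ n →
    (List.range m).foldl (fun c i =>
        if c.getD i "" ≠ "green" then
          c.set i (if PySem.Set.contains t (g.getD i ' ') then "yellow" else "grey")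
        else c)
        ((List.range 5).map (pvF1 s g n))
      = (List.range 5).map (fun p =>
          if p < n ∧ g.getD p ' ' = s.getD p ' ' then "green"
          else if p < m then (if pvYel s g n p = true then "yellow" else "grey") else "") := by
  intro m hm
  induction m with
  | zero =>
    simp only [List.range_zero, List.foldl_nil]
    apply pvMapRange5_congr
    intro p hp
    rw [pvF1]
    by_cases hc : p < n ∧ g.getD p ' ' = s.getD p ' '
    · rw [if_pos hc, if_pos hc]
    · rw [if_neg hc, if_neg hc, if_neg (show ¬ p < 0 from by omega)]
  | succ m ihm =>
    rw [show List.range (m+1) = List.range m ++ [m] from List.range_succ, List.foldl_append,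
      ihm (by omega)]
    simp only [List.foldl_cons, List.foldl_nil]
    rw [pvMap5_getD]
    have hm5 : m < 5 := by omega
    have hmn : m < n := by omega
    rw [if_pos hm5]
    by_cases hgr : g.getD m ' ' = s.getD m ' '
    · rw [if_neg (by rw [if_pos ⟨hmn, hgr⟩]; exact fun h => h rfl)]
      apply pvMapRange5_congr
      intro p hp
      by_cases hpk : p = m
      · subst hpk
        have hc : p < n ∧ g.getD p ' ' = s.getD p ' ' := ⟨hmn, hgr⟩
        simp only [if_pos hc]
      · simp only [show (p < m) ↔ (p < m + 1) from by omega]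
    · rw [if_pos (by rw [if_neg (fun h => hgr h.2), if_neg (show ¬ m < m from by omega)]; decide),
        ht (g.getD m ' '),
        show pvMem s g n (g.getD m ' ') = pvYel s g n m from rfl,
        pvMap5_set _ m hm5]
      apply pvMapRange5_congr
      intro p hp
      by_cases hpk : p = m
      · subst hpk
        rw [if_pos rfl, if_neg (show ¬(p < n ∧ g.getD p ' ' = s.getD p ' ') from
          fun h => hgr h.2), if_pos (Nat.lt_succ_self p)]
      · rw [if_neg hpk]
        simp only [show (p < m) ↔ (p < m + 1) from by omega]

theorem pvA_eq (secret guess : String) (hn : secret.toList.length ≤ 5) :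
    easy_check_word secret guess
      = (List.range 5).map (pvF3 secret.toList guess.toList secret.toList.length secret.toList.length) := by
  simp only [easy_check_word]
  rw [pvGreenA secret.toList guess.toList secret.toList.length hn,
    pvYellowA secret.toList guess.toList secret.toList.length hn secret.toList.length le_rfl,
    pvGrey secret.toList guess.toList secret.toList.length hn secret.toList.length le_rfl]

theorem pvB_eq (secret guess : String) (hn : secret.toList.length ≤ 5) :
    easy_check_word_alt secret guess
      = (List.range 5).map (pvF3 secret.toList guess.toList secret.toList.length secret.toList.length) := by
  simp only [easy_check_word_alt]
  rw [pvGreenB secret.toList guess.toList secret.toList.length hn]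
  rw [pvPass2B secret.toList guess.toList secret.toList.length hn _
    (fun c => pvSetB secret.toList guess.toList secret.toList.length c)
    secret.toList.length le_rfl]
  apply pvMapRange5_congr
  intro p hp
  rw [pvF3]
  by_cases hc : p < secret.toList.length ∧ guess.toList.getD p ' ' = secret.toList.getD p ' '
  · rw [if_pos hc, if_pos hc]
  · rw [if_neg hc, if_neg hc]
    by_cases hpn : p < secret.toList.length
    · rw [if_pos hpn]
      by_cases hy : pvYel secret.toList guess.toList secret.toList.length p = true
      · rw [if_pos hy, if_pos ⟨hpn, hy⟩]
      · rw [if_neg hy, if_neg (show ¬(p < secret.toList.length ∧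
          pvYel secret.toList guess.toList secret.toList.length p = true) from fun h => hy h.2),
          if_pos hpn]
    · rw [if_neg hpn, if_neg (fun h => hpn h.1), if_neg hpn]

-- ===== VERDICT (by name: the statement is the Claim_ definition above) =====
theorem easy_check_word_spec : Claim_equal_easy_check_word := by
  intro secret guess _ hpre
  unfold Spec_easy_check_word
  obtain ⟨h5, -⟩ := hpre
  rw [pvA_eq _ _ h5, pvB_eq _ _ h5]
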